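-- pv_equiv track=rewrite | github.com/sproutsai-engg/coding_question_generator | json_files/python_codes/Q_1668.py | longestAwesomeSubstring
-- ===== SOURCE A (Python) =====
-- def longestAwesomeSubstring(s):
--     n = len(s)
--     maxLen = 0
--     for i in range(n):
--         for j in range(i + 1, n + 1):
--             substr = s[i:j]
--             if isAwesome(substr):
--                 maxLen = max(maxLen, j - i)
--     return maxLen
--
-- def isAwesome(s):
--     odd_count = 0
--     freq = [0] * 26
--     for c in s:
--         freq[ord(c) - ord('a')] += 1
--     for i in range(26):
--         if freq[i] % 2 == 1:
--             odd_count += 1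
--     return odd_count <= 1
-- ===== SOURCE B (Python) =====
-- def longestAwesomeSubstring(s):
--     # prefix parity bitmask + earliest-index map: O(26 n)
--     first = {0: -1}
--     mask = 0
--     best = 0
--     for i, c in enumerate(s):
--         mask ^= 1 << ((ord(c) - 97) % 26)
--         if mask in first:
--             best = max(best, i - first[mask])
--         else:
--             first[mask] = i
--         for b in range(26):
--             m2 = mask ^ (1 << b)
--             if m2 in first:
--                 best = max(best, i - first[m2])
--     return best
-- ===== Notes on version B (the rewrite author's own statement) =====
-- stated objective: faster
-- what changed: Replaced the O(n^3) enumerate-all-substrings-and-recount-letter-frequencies search by a single left-to-right pass keeping a 26-bit prefix parity bitmask and a dict of each mask's earliest index, checking the current mask and its 26 one-bit flips at every position.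
import Mathlib
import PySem

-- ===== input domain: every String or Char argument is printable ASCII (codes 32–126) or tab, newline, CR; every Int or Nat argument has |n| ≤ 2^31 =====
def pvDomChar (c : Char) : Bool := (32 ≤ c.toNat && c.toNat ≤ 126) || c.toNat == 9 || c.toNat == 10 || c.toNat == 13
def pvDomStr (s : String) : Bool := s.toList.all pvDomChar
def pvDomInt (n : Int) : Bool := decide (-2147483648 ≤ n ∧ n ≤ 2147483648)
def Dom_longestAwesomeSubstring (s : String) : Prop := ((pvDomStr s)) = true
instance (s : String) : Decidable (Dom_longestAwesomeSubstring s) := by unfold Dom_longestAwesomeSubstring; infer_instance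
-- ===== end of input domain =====

-- B replaces A's O(n^3) all-substrings frequency recount by one pass with a 26-bit
-- prefix-parity bitmask and an earliest-index map (objective: faster, asymptotic).


-- ===== PORT A =====
-- helper isAwesome, on the character list of the Python slice
def pvIsAwesomeA (t : List Char) : Bool :=
  let freq : List Int := List.replicate 26 0
  let freq := t.foldl (fun f c =>
    PySem.List.pySetD f ((c.toNat : Int) - 97)
      (PySem.List.pyGetD f ((c.toNat : Int) - 97) 0 + 1)) freq
  let oddCount : Int := (PySem.List.pyRange 0 26 1).foldl
    (fun acc i => if PySem.Int.mod (PySem.List.pyGetD freq i 0) 2 = 1 then acc + 1 else acc) 0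
  oddCount ≤ 1

def longestAwesomeSubstring (s : String) : Int :=
  let l := s.toList
  let n : Int := (l.length : Int)
  (PySem.List.pyRange 0 n 1).foldl (fun maxLen i =>
    (PySem.List.pyRange (i + 1) (n + 1) 1).foldl (fun maxLen j =>
      let substr := PySem.List.slice l (some i) (some j)
      if pvIsAwesomeA substr then max maxLen (j - i) else maxLen) maxLen) 0

-- ===== PORT B =====
-- the Python masks are nonnegative bitmask ints (< 2^26): ported as Nat, exact
def longestAwesomeSubstring_alt (s : String) : Int :=
  let st := (PySem.List.enumerate s.toList 0).foldl
    (fun (st : PySem.Dict Nat Int × Nat × Int) p =>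
      let first := st.1
      let mask := st.2.1 ^^^ (1 <<< (PySem.Int.mod ((p.2.toNat : Int) - 97) 26).toNat)
      let fb : PySem.Dict Nat Int × Int :=
        if first.contains mask then (first, max st.2.2 (p.1 - first.getD mask 0))
        else (first.insert mask p.1, st.2.2)
      let best := (PySem.List.pyRange 0 26 1).foldl
        (fun best b =>
          let m2 := mask ^^^ (1 <<< b.toNat)
          if fb.1.contains m2 then max best (p.1 - fb.1.getD m2 0) else best) fb.2
      (fb.1, mask, best))
    ((PySem.Dict.empty).insert 0 (-1), 0, 0)
  st.2.2

-- ===== PRECONDITION & SPEC =====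
-- Pre_ excludes exactly the strings on which A raises IndexError: a character whose
-- code is outside 71..122 makes freq[ord(c)-97] an out-of-range Python list index.
def Pre_longestAwesomeSubstring (s : String) : Prop :=
  (s.toList.all (fun c => 71 ≤ c.toNat && c.toNat ≤ 122)) = true
instance (s : String) : Decidable (Pre_longestAwesomeSubstring s) := by
  unfold Pre_longestAwesomeSubstring; infer_instance
def pvWitness_longestAwesomeSubstring : String := "abcb"

def Spec_longestAwesomeSubstring (s : String) (out : Int) : Prop :=
  out = longestAwesomeSubstring_alt s
instance (s : String) (out : Int) : Decidable (Spec_longestAwesomeSubstring s out) := by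
  unfold Spec_longestAwesomeSubstring; infer_instance

-- ===== CLAIM (what is proved, stated in full; the proofs are below) =====
def Claim_equal_longestAwesomeSubstring : Prop :=
  ∀ (s : String), Dom_longestAwesomeSubstring s → Pre_longestAwesomeSubstring s →
    Spec_longestAwesomeSubstring s (longestAwesomeSubstring s)

-- ===== LEMMAS AND PROOFS =====

-- character bucket (index into freq, resolved the Python way), parity bitmask machinery
def pvBkt (c : Char) : Nat := (PySem.Int.mod ((c.toNat : Int) - 97) 26).toNat

def pvMsk (t : List Char) : Nat := t.foldl (fun m c => m ^^^ (1 <<< pvBkt c)) 0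

def pvPm (l : List Char) (k : Nat) : Nat := pvMsk (l.take k)

def pvGood (m : Nat) : Bool := decide (((List.range 26).countP (fun b => m.testBit b)) ≤ 1)

def pvFindMin (l : List Char) (u : Nat) (m : Nat) : Option Nat :=
  (List.range u).find? (fun t => pvPm l t == m)

def pvCands (l : List Char) (u : Nat) : List Int :=
  (match pvFindMin l u (pvPm l u) with
   | some e => [(u : Int) - (e : Int)] | none => []) ++
  (List.range 26).flatMap (fun b =>
    match pvFindMin l (u + 1) (pvPm l u ^^^ (1 <<< b)) with
    | some e => [(u : Int) - (e : Int)] | none => [])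

def pvDistsB (l : List Char) : List Int := (List.range l.length).flatMap (fun i => pvCands l (i + 1))

def pvDistsA (l : List Char) : List Int :=
  (PySem.List.pyRange 0 (l.length : Int) 1).flatMap (fun i =>
    ((PySem.List.pyRange (i + 1) ((l.length : Int) + 1) 1).filter
      (fun j => pvGood (pvPm l i.toNat ^^^ pvPm l j.toNat))).map (fun j => j - i))

lemma pvBkt_lt (c : Char) : pvBkt c < 26 := by
  unfold pvBkt
  have h1 := PySem.Int.mod_nonneg ((c.toNat : Int) - 97) (b := 26) (by norm_num)
  have h2 := PySem.Int.mod_lt ((c.toNat : Int) - 97) (b := 26) (by norm_num)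
  omega

lemma pvIdx_eq (c : Char) (h1 : 71 ≤ c.toNat) (h2 : c.toNat ≤ 122) :
    PySem.List.pyIdx? 26 ((c.toNat : Int) - 97) = some (pvBkt c) := by
  unfold pvBkt
  rw [PySem.Int.mod_eq_emod_of_pos (by norm_num : (0:Int) < 26)]
  simp only [PySem.List.pyIdx?]
  split_ifs <;> [skip; omega; skip; omega] <;> congr 1 <;> omega


lemma pvMsk_from (t : List Char) (m : Nat) :
    t.foldl (fun m c => m ^^^ (1 <<< pvBkt c)) m = m ^^^ pvMsk t := by
  induction t generalizing m with
  | nil => simp only [List.foldl_nil, pvMsk, Nat.xor_zero]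
  | cons c t ih =>
      simp only [pvMsk, List.foldl_cons]
      rw [ih, ih]
      simp [Nat.xor_assoc]

lemma pvMsk_append (t u : List Char) : pvMsk (t ++ u) = pvMsk t ^^^ pvMsk u := by
  have := pvMsk_from u (pvMsk t)
  simpa [pvMsk, List.foldl_append] using this

lemma pvMsk_lt (t : List Char) : pvMsk t < 2 ^ 26 := by
  induction t using List.reverseRecOn with
  | nil => simp [pvMsk]
  | append_singleton t c ih =>
      rw [pvMsk_append]
      refine Nat.xor_lt_two_pow ih ?_
      simp only [pvMsk, List.foldl_cons, List.foldl_nil, Nat.zero_xor, Nat.shiftLeft_eq, one_mul]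
      exact Nat.pow_lt_pow_right (by norm_num) (pvBkt_lt c)

lemma pvMsk_testBit (t : List Char) (b : Nat) :
    (pvMsk t).testBit b = ((t.countP (fun c => pvBkt c == b)) % 2 == 1) := by
  induction t using List.reverseRecOn with
  | nil => simp [pvMsk]
  | append_singleton t c ih =>
      rw [pvMsk_append, Nat.testBit_xor, ih]
      have hc : pvMsk [c] = 2 ^ pvBkt c := by
        simp [pvMsk, Nat.shiftLeft_eq]
      rw [hc, Nat.testBit_two_pow, List.countP_append]
      by_cases hb : pvBkt c = b
      · simp only [List.countP_cons, List.countP_nil, hb, beq_self_eq_true, if_pos, decide_true]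
        rcases Nat.mod_two_eq_zero_or_one (t.countP (fun c => pvBkt c == b)) with h | h <;>
          simp [Nat.add_mod, h]
      · have : (pvBkt c == b) = false := by simp [hb]
        simp [this, hb]

lemma pvPm_lt (l : List Char) (k : Nat) : pvPm l k < 2 ^ 26 := pvMsk_lt _

lemma pvPm_append (l ext : List Char) (t : Nat) (h : t ≤ l.length) :
    pvPm (l ++ ext) t = pvPm l t := by
  simp [pvPm, List.take_append_of_le_length h]

lemma pvPm_full (l : List Char) (t : Nat) (h : l.length ≤ t) : pvPm l t = pvMsk l := by
  simp [pvPm, List.take_of_length_le h]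

lemma pvGood_iff (m : Nat) (hm : m < 2 ^ 26) :
    pvGood m = true ↔ m = 0 ∨ ∃ b < 26, m = 2 ^ b := by
  constructor
  · intro h
    simp only [pvGood, decide_eq_true_eq, List.countP_eq_length_filter] at h
    have hnb : ∀ i, 26 ≤ i → m.testBit i = false := by
      intro i hi
      exact Nat.testBit_eq_false_of_lt (lt_of_lt_of_le hm (Nat.pow_le_pow_right (by norm_num) hi))
    rcases hl : (List.range 26).filter (fun b => m.testBit b) with _ | ⟨b, rest⟩
    · left
      apply Nat.eq_of_testBit_eq
      intro i
      simp only [Nat.zero_testBit]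
      by_cases hi : i < 26
      · by_contra hbit
        have : i ∈ (List.range 26).filter (fun b => m.testBit b) := by
          simp [List.mem_filter, List.mem_range, hi]
          simpa using hbit
        rw [hl] at this; simp at this
      · exact hnb i (by omega)
    · right
      have hb : b ∈ (List.range 26).filter (fun b => m.testBit b) := by rw [hl]; exact List.mem_cons_self
      rw [List.mem_filter, List.mem_range] at hb
      refine ⟨b, hb.1, ?_⟩
      have hrest : rest = [] := by
        rw [hl] at h; simp at h; omega
      apply Nat.eq_of_testBit_eq
      intro i
      rw [Nat.testBit_two_pow]
      by_cases hib : i = b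
      · simp [hib, hb.2]
      · simp only [decide_eq_false (Ne.symm hib : ¬ b = i)]
        by_cases hi : i < 26
        · by_contra hbit
          have : i ∈ (List.range 26).filter (fun b => m.testBit b) := by
            simp [List.mem_filter, List.mem_range, hi]
            simpa using hbit
          rw [hl, hrest] at this
          simp at this; omega
        · exact hnb i (by omega)
  · intro h
    rcases h with h | ⟨b, hb, h⟩
    · subst h; simp [pvGood]
    · subst h
      simp only [pvGood, decide_eq_true_eq, Nat.testBit_two_pow]
      have he : (fun i => decide (b = i)) = (fun i : Nat => i == b) := by
        funext i
        by_cases h : b = i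
        · subst h; simp
        · simp [h, Ne.symm h]
      have : (List.range 26).countP (fun i => decide (b = i)) = 1 := by
        rw [he]
        exact List.count_eq_one_of_mem (List.nodup_range) (by simpa using hb)
      omega

lemma pvFind_range_le {k t : Nat} {p : Nat → Bool} (ht : t < k) (hp : p t = true) :
    ∃ e, (List.range k).find? p = some e ∧ e ≤ t ∧ p e = true := by
  induction k with
  | zero => omega
  | succ k ih =>
      rw [List.range_succ, List.find?_append]
      by_cases htk : t < k
      · obtain ⟨e, he, het, hpe⟩ := ih htk
        exact ⟨e, by rw [he]; rfl, het, hpe⟩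
      · have htk' : t = k := by omega
        subst htk'
        rcases hf : (List.range t).find? p with _ | e
        · simp [hp]
        · have hpe := List.find?_some hf
          have het : e < t := by simpa using List.mem_of_find?_eq_some hf
          exact ⟨e, rfl, by omega, hpe⟩

lemma pvFind_range_spec {k e : Nat} {p : Nat → Bool} (h : (List.range k).find? p = some e) :
    e < k ∧ p e = true :=
  ⟨by simpa using List.mem_of_find?_eq_some h, List.find?_some h⟩

lemma pvFoldl_max_le (xs ys : List Int) (a : Int) (h : ∀ x ∈ xs, ∃ y ∈ ys, x ≤ y) :
    xs.foldl max a ≤ ys.foldl max a := by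
  rcases PySem.List.foldl_max_mem xs a with hx | hx
  · rw [hx]; exact (PySem.List.le_foldl_max ys a).1
  · obtain ⟨y, hy, hxy⟩ := h _ hx
    exact le_trans hxy ((PySem.List.le_foldl_max ys a).2 y hy)

lemma pvFoldl_max_congr (xs ys : List Int) (a : Int)
    (h1 : ∀ x ∈ xs, ∃ y ∈ ys, x ≤ y) (h2 : ∀ y ∈ ys, ∃ x ∈ xs, y ≤ x) :
    xs.foldl max a = ys.foldl max a :=
  le_antisymm (pvFoldl_max_le xs ys a h1) (pvFoldl_max_le ys xs a h2)

lemma pvStep_eq (g : Nat → Int) (c : Char) (h1 : 71 ≤ c.toNat) (h2 : c.toNat ≤ 122) :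
    PySem.List.pySetD ((List.range 26).map (fun b => g b)) ((c.toNat : Int) - 97)
      (PySem.List.pyGetD ((List.range 26).map (fun b => g b)) ((c.toNat : Int) - 97) 0 + 1)
    = (List.range 26).map (fun b => if b = pvBkt c then g b + 1 else g b) := by
  have hlen : ((List.range 26).map (fun b => g b)).length = 26 := by simp
  have hidx : PySem.List.pyIdx? ((List.range 26).map (fun b => g b)).length ((c.toNat : Int) - 97)
      = some (pvBkt c) := by rw [hlen]; exact pvIdx_eq c h1 h2
  have hget : PySem.List.pyGetD ((List.range 26).map (fun b => g b)) ((c.toNat : Int) - 97) 0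
      = g (pvBkt c) := by
    simp only [PySem.List.pyGetD, PySem.List.pyGet?, hidx, Option.bind_some]
    simp [pvBkt_lt c]
  simp only [PySem.List.pySetD, PySem.List.pySet?, hidx, Option.map_some, Option.getD_some, hget]
  apply List.ext_getElem
  · simp
  · intro i hi1 hi2
    simp only [List.length_set, List.length_map, List.length_range] at hi1
    rw [List.getElem_set]
    simp only [List.getElem_map, List.getElem_range]
    by_cases hib : pvBkt c = i
    · rw [if_pos hib, if_pos hib.symm, hib]
    · rw [if_neg hib, if_neg (fun h => hib h.symm)]

lemma pvFreq_eq (t : List Char) (h : ∀ c ∈ t, 71 ≤ c.toNat ∧ c.toNat ≤ 122) :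
    t.foldl (fun f c => PySem.List.pySetD f ((c.toNat : Int) - 97)
      (PySem.List.pyGetD f ((c.toNat : Int) - 97) 0 + 1)) (List.replicate 26 (0 : Int))
    = (List.range 26).map (fun b => (t.countP (fun c => pvBkt c == b) : Int)) := by
  induction t using List.reverseRecOn with
  | nil =>
      simp only [List.foldl_nil, List.countP_nil]
      apply List.ext_getElem <;> simp
  | append_singleton t c ih =>
      have hc := h c (by simp)
      have ht : ∀ c ∈ t, 71 ≤ c.toNat ∧ c.toNat ≤ 122 := fun x hx => h x (by simp [hx])
      rw [List.foldl_append, ih ht, List.foldl_cons, List.foldl_nil]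
      rw [pvStep_eq (fun b => (t.countP (fun c => pvBkt c == b) : Int)) c hc.1 hc.2]
      apply List.ext_getElem
      · simp
      · intro i hi1 hi2
        simp only [List.length_map, List.length_range] at hi1
        simp only [List.getElem_map, List.getElem_range, List.countP_append]
        by_cases hib : i = pvBkt c
        · simp [← hib]
        · have : (pvBkt c == i) = false := by simp [Ne.symm hib]
          simp [hib, this]

lemma pvIsAwesome_eq (t : List Char) (h : ∀ c ∈ t, 71 ≤ c.toNat ∧ c.toNat ≤ 122) :
    pvIsAwesomeA t = pvGood (pvMsk t) := by
  simp only [pvIsAwesomeA]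
  rw [pvFreq_eq t h]
  rw [PySem.List.pyRange_one]
  have h26 : ((26 : Int) - 0).toNat = 26 := by decide
  rw [h26, List.foldl_map]
  have hbody : ∀ (acc : Int), ∀ k ∈ List.range 26,
      (fun (acc : Int) (k : Nat) =>
        if PySem.Int.mod (PySem.List.pyGetD ((List.range 26).map
            (fun b => (t.countP (fun c => pvBkt c == b) : Int))) ((0 : Int) + (k : Int)) 0) 2 = 1
        then acc + 1 else acc) acc k
      = (fun (acc : Int) (k : Nat) =>
          if (t.countP (fun c => pvBkt c == k)) % 2 = 1 then acc + 1 else acc) acc k := by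
    intro acc k hk
    beta_reduce
    rw [List.mem_range] at hk
    have hg : PySem.List.pyGetD ((List.range 26).map
        (fun b => (t.countP (fun c => pvBkt c == b) : Int))) ((0 : Int) + (k : Int)) 0
        = (t.countP (fun c => pvBkt c == k) : Int) := by
      rw [zero_add, PySem.List.pyGetD_natCast]
      simp [List.getD, hk]
    rw [hg]
    have : PySem.Int.mod ((t.countP (fun c => pvBkt c == k) : Int)) 2
        = ((t.countP (fun c => pvBkt c == k) % 2 : Nat) : Int) := by
      exact_mod_cast PySem.Int.mod_natCast _ 2
    rw [this]
    congr 1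
    rw [eq_iff_iff]
    constructor <;> intro h' <;> exact_mod_cast h'
  rw [PySem.List.foldl_congr_mem _ _ _ _ hbody]
  rw [PySem.List.foldl_ite_add_one]
  simp only [pvGood, zero_add]
  have hcp : (List.range 26).countP (fun b => (pvMsk t).testBit b)
      = (List.range 26).countP (fun k => decide (t.countP (fun c => pvBkt c == k) % 2 = 1)) := by
    apply List.countP_congr
    intro b _
    rw [pvMsk_testBit, Bool.eq_iff_iff]
    simp
  rw [hcp, decide_eq_decide]
  constructor <;> intro h' <;> exact_mod_cast h'

lemma pvMsk_slice (l : List Char) (a b : Nat) (hab : a ≤ b) :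
    pvMsk ((l.drop a).take (b - a)) = pvPm l a ^^^ pvPm l b := by
  have hb : a + (b - a) = b := by omega
  have h1 : l.take b = l.take a ++ (l.drop a).take (b - a) := by
    rw [← List.take_add, hb]
  have h2 : pvPm l b = pvPm l a ^^^ pvMsk ((l.drop a).take (b - a)) := by
    rw [pvPm, pvPm, h1, pvMsk_append]
  rw [h2]
  rw [← Nat.xor_assoc, Nat.xor_self, Nat.zero_xor]

lemma pvA_eq (s : String) (h : ∀ c ∈ s.toList, 71 ≤ c.toNat ∧ c.toNat ≤ 122) :
    longestAwesomeSubstring s = (pvDistsA s.toList).foldl max 0 := by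
  simp only [longestAwesomeSubstring]
  rw [pvDistsA, List.foldl_flatMap]
  apply PySem.List.foldl_congr_mem
  intro acc i hi
  rw [PySem.List.mem_pyRange_one] at hi
  rw [List.foldl_map, ← PySem.List.foldl_if_eq_foldl_filter]
  apply PySem.List.foldl_congr_mem
  intro acc2 j hj
  rw [PySem.List.mem_pyRange_one] at hj
  have hij : i.toNat ≤ j.toNat := by omega
  have hslice : PySem.List.slice s.toList (some i) (some j)
      = (s.toList.drop i.toNat).take (j.toNat - i.toNat) :=
    PySem.List.slice_toNat _ (by omega) (by omega)
  have hcond : pvIsAwesomeA (PySem.List.slice s.toList (some i) (some j))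
      = pvGood (pvPm s.toList i.toNat ^^^ pvPm s.toList j.toNat) := by
    rw [pvIsAwesome_eq _ (fun c hc => h c (PySem.List.mem_of_mem_slice _ _ _ hc)), hslice,
      pvMsk_slice _ _ _ hij]
  rw [hcond]

-- proof-side name for B's loop body (definitionally the port's lambda)
def pvStepB (st : PySem.Dict Nat Int × Nat × Int) (p : Int × Char) :
    PySem.Dict Nat Int × Nat × Int :=
  let first := st.1
  let mask := st.2.1 ^^^ (1 <<< (PySem.Int.mod ((p.2.toNat : Int) - 97) 26).toNat)
  let fb : PySem.Dict Nat Int × Int :=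
    if first.contains mask then (first, max st.2.2 (p.1 - first.getD mask 0))
    else (first.insert mask p.1, st.2.2)
  let best := (PySem.List.pyRange 0 26 1).foldl
    (fun best b =>
      let m2 := mask ^^^ (1 <<< b.toNat)
      if fb.1.contains m2 then max best (p.1 - fb.1.getD m2 0) else best) fb.2
  (fb.1, mask, best)

lemma pvAlt_eq (s : String) :
    longestAwesomeSubstring_alt s
      = ((PySem.List.enumerate s.toList 0).foldl pvStepB
          ((PySem.Dict.empty).insert 0 (-1), 0, 0)).2.2 := rfl

lemma pvFind_range_congr {k : Nat} {p q : Nat → Bool} (h : ∀ t < k, p t = q t) :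
    (List.range k).find? p = (List.range k).find? q := by
  induction k with
  | zero => rfl
  | succ k ih =>
      rw [List.range_succ, List.find?_append, List.find?_append,
        ih (fun t ht => h t (by omega))]
      congr 1
      simp only [List.find?_cons, List.find?_nil, h k (by omega)]

lemma pvFindMin_append (l : List Char) (c : Char) (u m : Nat) (hu : u ≤ l.length + 1) :
    pvFindMin (l ++ [c]) u m = pvFindMin l u m := by
  unfold pvFindMin
  apply pvFind_range_congr
  intro t ht
  rw [pvPm_append l [c] t (by omega)]

lemma pvCands_append (l : List Char) (c : Char) (u : Nat) (hu : u ≤ l.length) :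
    pvCands (l ++ [c]) u = pvCands l u := by
  unfold pvCands
  rw [pvFindMin_append l c u _ (by omega), pvPm_append l [c] u (by omega)]
  congr 1
  apply List.flatMap_congr
  intro b _
  rw [pvFindMin_append l c (u + 1) _ (by omega)]

lemma pvGood_zero : pvGood 0 = true := by simp [pvGood, Nat.zero_testBit]

lemma pvGood_two_pow (b : Nat) (hb : b < 26) : pvGood (2 ^ b) = true :=
  (pvGood_iff _ (Nat.pow_lt_pow_right (by norm_num) hb)).mpr (Or.inr ⟨b, hb, rfl⟩)

lemma pvMem_cands (l : List Char) (u : Nat) (x : Int) :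
    x ∈ pvCands l u ↔
      (∃ e, pvFindMin l u (pvPm l u) = some e ∧ x = (u : Int) - (e : Int)) ∨
      (∃ b < 26, ∃ e, pvFindMin l (u + 1) (pvPm l u ^^^ (1 <<< b)) = some e ∧
        x = (u : Int) - (e : Int)) := by
  unfold pvCands
  rw [List.mem_append, List.mem_flatMap]
  constructor
  · rintro (h | ⟨b, hb, h⟩)
    · left
      rcases hf : pvFindMin l u (pvPm l u) with _ | e <;> rw [hf] at h
      · simp at h
      · simp at h; exact ⟨e, rfl, h⟩
    · right
      rw [List.mem_range] at hb
      rcases hf : pvFindMin l (u + 1) (pvPm l u ^^^ (1 <<< b)) with _ | e <;> rw [hf] at h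
      · simp at h
      · simp at h; exact ⟨b, hb, e, hf, h⟩
  · rintro (⟨e, hf, hx⟩ | ⟨b, hb, e, hf, hx⟩)
    · left; rw [hf]; simp [hx]
    · right
      exact ⟨b, by simpa using hb, by rw [hf]; simp [hx]⟩

lemma pvFindMin_succ (l : List Char) (u m : Nat) :
    pvFindMin l (u + 1) m
      = (pvFindMin l u m).or (if pvPm l u == m then some u else none) := by
  unfold pvFindMin
  rw [List.range_succ, List.find?_append]
  congr 1
  simp only [List.find?]
  by_cases h : pvPm l u = m
  · have hb : (pvPm l u == m) = true := by simp [h]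
    rw [hb]; rfl
  · have hb : (pvPm l u == m) = false := by simp [h]
    rw [hb]; rfl

lemma pvFirst_step (l : List Char) (c : Char) (d : PySem.Dict Nat Int)
    (hd : ∀ m, d.get? m = (pvFindMin l (l.length + 1) m).map (fun t => (t : Int) - 1)) (m : Nat) :
    (if d.contains (pvMsk (l ++ [c])) then d
     else d.insert (pvMsk (l ++ [c])) (l.length : Int)).get? m
    = (pvFindMin (l ++ [c]) (l.length + 2) m).map (fun t => (t : Int) - 1) := by
  have hlen : (l ++ [c]).length = l.length + 1 := by simp
  have hr : pvFindMin (l ++ [c]) (l.length + 2) m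
      = (pvFindMin l (l.length + 1) m).or
          (if pvMsk (l ++ [c]) == m then some (l.length + 1) else none) := by
    have := pvFindMin_succ (l ++ [c]) (l.length + 1) m
    rw [pvFindMin_append l c (l.length + 1) m (by omega)] at this
    rw [pvPm_full (l ++ [c]) (l.length + 1) (by simp)] at this
    exact this
  have hcont : d.contains (pvMsk (l ++ [c]))
      = ((pvFindMin l (l.length + 1) (pvMsk (l ++ [c]))).map (fun t => (t : Int) - 1)).isSome := by
    rw [PySem.Dict.contains_eq_isSome_get?, hd]
  rcases hcm : pvFindMin l (l.length + 1) (pvMsk (l ++ [c])) with _ | eM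
  · rw [hcm] at hcont
    simp at hcont
    rw [if_neg (by simp [hcont])]
    rw [PySem.Dict.get?_insert]
    by_cases hmM : m = pvMsk (l ++ [c])
    · subst hmM
      rw [if_pos rfl, hr, hcm, Option.none_or]
      have hb : (pvMsk (l ++ [c]) == pvMsk (l ++ [c])) = true := by simp
      rw [hb, if_pos rfl]
      simp only [Option.map_some, Option.bind_eq_bind, Option.bind_some,
        Option.pure_def]
      congr 1
      push_cast
      ring
    · rw [if_neg hmM, hr, hd m]
      have : (pvMsk (l ++ [c]) == m) = false := by
        rw [beq_eq_false_iff_ne]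
        exact fun h' => hmM h'.symm
      rw [this]
      simp
  · rw [hcm] at hcont
    simp at hcont
    rw [if_pos (by simp [hcont])]
    rw [hd m, hr]
    rcases hfm : pvFindMin l (l.length + 1) m with _ | e
    · have hmM : ¬ (pvMsk (l ++ [c]) == m) = true := by
        intro hb
        rw [beq_iff_eq] at hb
        rw [hb] at hcm
        rw [hfm] at hcm
        simp at hcm
      simp only [Option.none_or]
      rw [if_neg hmM]
    · simp

lemma pvFlip_fold (l' : List Char) (u : Nat) (i : Int) (hi : i + 1 = (u : Int))
    (d : PySem.Dict Nat Int) (b0 : Int)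
    (hd : ∀ m, d.get? m = (pvFindMin l' (u + 1) m).map (fun t => (t : Int) - 1)) :
    (PySem.List.pyRange 0 26 1).foldl (fun best b =>
       if d.contains (pvMsk l' ^^^ (1 <<< b.toNat)) then
         max best (i - d.getD (pvMsk l' ^^^ (1 <<< b.toNat)) 0)
       else best) b0
    = ((List.range 26).flatMap (fun b =>
        match pvFindMin l' (u + 1) (pvMsk l' ^^^ (1 <<< b)) with
        | some e => [(u : Int) - (e : Int)] | none => [])).foldl max b0 := by
  rw [PySem.List.pyRange_one]
  have h26 : ((26 : Int) - 0).toNat = 26 := by decide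
  rw [h26, List.foldl_map, List.foldl_flatMap]
  apply PySem.List.foldl_congr_mem
  intro acc k hk
  beta_reduce
  have htn : ((0 : Int) + (k : Int)).toNat = k := by omega
  rw [htn]
  have hcont : d.contains (pvMsk l' ^^^ (1 <<< k))
      = ((pvFindMin l' (u + 1) (pvMsk l' ^^^ (1 <<< k))).map (fun t => (t : Int) - 1)).isSome := by
    rw [PySem.Dict.contains_eq_isSome_get?, hd]
  rcases hfm : pvFindMin l' (u + 1) (pvMsk l' ^^^ (1 <<< k)) with _ | e
  · rw [hfm] at hcont
    simp at hcont
    rw [if_neg (by simp [hcont])]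
    simp
  · rw [hfm] at hcont
    simp at hcont
    rw [if_pos (by simp [hcont])]
    rw [PySem.Dict.getD_eq_get?_getD, hd, hfm]
    simp only [Option.map_some, Option.bind_eq_bind, Option.bind_some,
      Option.pure_def, Option.getD_some, List.foldl_cons, List.foldl_nil]
    congr 1
    omega

lemma pvDistsB_append (l : List Char) (c : Char) :
    pvDistsB (l ++ [c]) = pvDistsB l ++ pvCands (l ++ [c]) (l.length + 1) := by
  unfold pvDistsB
  rw [List.length_append, List.length_singleton, List.range_succ, List.flatMap_append]
  congr 1
  · apply List.flatMap_congr
    intro i hi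
    rw [List.mem_range] at hi
    exact pvCands_append l c (i + 1) (by omega)
  · simp

lemma pvB_inv (l : List Char) :
    (((PySem.List.enumerate l 0).foldl pvStepB ((PySem.Dict.empty).insert 0 (-1), 0, 0)).2.1
        = pvMsk l)
    ∧ (∀ m, ((PySem.List.enumerate l 0).foldl pvStepB
          ((PySem.Dict.empty).insert 0 (-1), 0, 0)).1.get? m
        = (pvFindMin l (l.length + 1) m).map (fun t => (t : Int) - 1))
    ∧ (((PySem.List.enumerate l 0).foldl pvStepB ((PySem.Dict.empty).insert 0 (-1), 0, 0)).2.2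
        = (pvDistsB l).foldl max 0) := by
  induction l using List.reverseRecOn with
  | nil =>
      refine ⟨rfl, ?_, rfl⟩
      intro m
      show ((PySem.Dict.empty).insert 0 (-1 : Int)).get? m
        = (pvFindMin [] 1 m).map (fun t => (t : Int) - 1)
      rw [PySem.Dict.get?_insert]
      unfold pvFindMin
      rw [show List.range 1 = [0] from rfl]
      simp only [List.find?]
      by_cases hm : m = 0
      · subst hm
        have : (pvPm [] 0 == 0) = true := by simp [pvPm, pvMsk]
        rw [this, if_pos rfl]
        rfl
      · rw [if_neg hm]
        have : (pvPm [] 0 == m) = false := by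
          rw [beq_eq_false_iff_ne]
          simp [pvPm, pvMsk]
          exact fun h' => hm h'.symm
        rw [this]
        simp
  | append_singleton l c ih =>
      obtain ⟨hm, hf, hb⟩ := ih
      have henum : PySem.List.enumerate (l ++ [c]) 0
          = PySem.List.enumerate l 0 ++ [((l.length : Int), c)] := by
        rw [PySem.List.enumerate_append]
        simp [PySem.List.enumerate_cons, PySem.List.enumerate_nil]
      rw [henum, List.foldl_append, List.foldl_cons, List.foldl_nil]
      set st := (PySem.List.enumerate l 0).foldl pvStepB
        ((PySem.Dict.empty).insert 0 (-1), 0, 0) with hst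
      have hMc : st.2.1 ^^^ (1 <<< (PySem.Int.mod ((c.toNat : Int) - 97) 26).toNat)
          = pvMsk (l ++ [c]) := by
        rw [hm, pvMsk_append]
        congr 1
        simp [pvMsk, pvBkt]
      simp only [pvStepB, hMc, apply_ite Prod.fst, apply_ite Prod.snd]
      have hlen' : (l ++ [c]).length = l.length + 1 := by simp
      refine ⟨by simp, ?_, ?_⟩
      · intro m
        rw [hlen']
        exact pvFirst_step l c st.1 hf m
      · -- the best component
        have hDspec : ∀ m, (if st.1.contains (pvMsk (l ++ [c])) = true then st.1
            else st.1.insert (pvMsk (l ++ [c])) (l.length : Int)).get? m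
            = (pvFindMin (l ++ [c]) ((l.length + 1) + 1) m).map (fun t => (t : Int) - 1) :=
          fun m => pvFirst_step l c st.1 hf m
        have hflip := pvFlip_fold (l ++ [c]) (l.length + 1) (l.length : Int)
          (by push_cast; ring)
          (if st.1.contains (pvMsk (l ++ [c])) = true then st.1
            else st.1.insert (pvMsk (l ++ [c])) (l.length : Int))
          (if st.1.contains (pvMsk (l ++ [c])) = true
            then max st.2.2 ((l.length : Int) - st.1.getD (pvMsk (l ++ [c])) 0)
            else st.2.2)
          hDspec
        rw [hflip, pvDistsB_append, List.foldl_append, ← hb]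
        have hcands : pvCands (l ++ [c]) (l.length + 1)
            = (match pvFindMin l (l.length + 1) (pvMsk (l ++ [c])) with
               | some e => [((l.length + 1 : Nat) : Int) - (e : Int)] | none => ([] : List Int))
              ++ (List.range 26).flatMap (fun b =>
                match pvFindMin (l ++ [c]) ((l.length + 1) + 1) (pvMsk (l ++ [c]) ^^^ (1 <<< b)) with
                | some e => [((l.length + 1 : Nat) : Int) - (e : Int)] | none => []) := by
          unfold pvCands
          rw [pvPm_full (l ++ [c]) (l.length + 1) (by simp),
            pvFindMin_append l c (l.length + 1) _ (by omega)]
        rw [hcands, List.foldl_append]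
        congr 1
        have hcont : st.1.contains (pvMsk (l ++ [c]))
            = ((pvFindMin l (l.length + 1) (pvMsk (l ++ [c]))).map
                (fun t => (t : Int) - 1)).isSome := by
          rw [PySem.Dict.contains_eq_isSome_get?, hf]
        rcases hcm : pvFindMin l (l.length + 1) (pvMsk (l ++ [c])) with _ | eM
        · rw [hcm] at hcont
          simp at hcont
          rw [if_neg (by simp [hcont])]
          simp
        · rw [hcm] at hcont
          simp at hcont
          rw [if_pos (by simp [hcont])]
          rw [PySem.Dict.getD_eq_get?_getD, hf, hcm]
          simp only [Option.map_some, Option.bind_eq_bind, Option.bind_some,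
            Option.pure_def, Option.getD_some, List.foldl_cons, List.foldl_nil]
          congr 1
          omega

lemma pvDistsA_to_B (l : List Char) :
    ∀ x ∈ pvDistsA l, ∃ y ∈ pvDistsB l, x ≤ y := by
  intro x hx
  simp only [pvDistsA, List.mem_flatMap, List.mem_map, List.mem_filter,
    PySem.List.mem_pyRange_one] at hx
  obtain ⟨i, ⟨hi0, hin⟩, j, ⟨⟨hj1, hj2⟩, hgood⟩, hxval⟩ := hx
  have htu : i.toNat < j.toNat := by omega
  have huL : j.toNat ≤ l.length := by omega
  have hxor := (pvGood_iff _ (Nat.xor_lt_two_pow (pvPm_lt l i.toNat) (pvPm_lt l j.toNat))).mp hgood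
  have hu1 : j.toNat - 1 + 1 = j.toNat := by omega
  rcases hxor with h0 | ⟨b, hb, hpow⟩
  · have heq : pvPm l i.toNat = pvPm l j.toNat := by
      have h := Nat.xor_eq_zero_iff.mp h0
      exact h
    obtain ⟨e, hfe, het, hpe⟩ := pvFind_range_le (k := j.toNat) (t := i.toNat)
      (p := fun t' => pvPm l t' == pvPm l j.toNat) htu (by simp [heq])
    refine ⟨(j.toNat : Int) - (e : Int), ?_, by omega⟩
    simp only [pvDistsB, List.mem_flatMap, List.mem_range]
    refine ⟨j.toNat - 1, by omega, ?_⟩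
    rw [hu1, pvMem_cands]
    exact Or.inl ⟨e, hfe, rfl⟩
  · have heq : pvPm l i.toNat = pvPm l j.toNat ^^^ (1 <<< b) := by
      rw [Nat.shiftLeft_eq, one_mul, ← hpow]
      rw [Nat.xor_comm (pvPm l i.toNat) (pvPm l j.toNat), ← Nat.xor_assoc,
        Nat.xor_self, Nat.zero_xor]
    obtain ⟨e, hfe, het, hpe⟩ := pvFind_range_le (k := j.toNat + 1) (t := i.toNat)
      (p := fun t' => pvPm l t' == pvPm l j.toNat ^^^ (1 <<< b)) (by omega) (by simp [heq])
    refine ⟨(j.toNat : Int) - (e : Int), ?_, by omega⟩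
    simp only [pvDistsB, List.mem_flatMap, List.mem_range]
    refine ⟨j.toNat - 1, by omega, ?_⟩
    rw [hu1, pvMem_cands]
    exact Or.inr ⟨b, hb, e, hfe, rfl⟩

lemma pvDistsB_to_A (l : List Char) :
    ∀ y ∈ pvDistsB l, ∃ x ∈ pvDistsA l, y ≤ x := by
  intro y hy
  simp only [pvDistsB, List.mem_flatMap, List.mem_range] at hy
  obtain ⟨i, hi, hyc⟩ := hy
  rw [pvMem_cands] at hyc
  rcases hyc with ⟨e, hfe, hyval⟩ | ⟨b, hb, e, hfe, hyval⟩
  · obtain ⟨heu, hpe⟩ := pvFind_range_spec hfe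
    have hpe' : pvPm l e = pvPm l (i + 1) := by simpa using hpe
    refine ⟨y, ?_, le_refl y⟩
    simp only [pvDistsA, List.mem_flatMap, List.mem_map, List.mem_filter,
      PySem.List.mem_pyRange_one]
    refine ⟨(e : Int), ⟨by omega, by omega⟩, ?_⟩
    refine ⟨((i + 1 : Nat) : Int), ⟨⟨by omega, by omega⟩, ?_⟩, by omega⟩
    have ht1 : ((e : Int)).toNat = e := by omega
    have ht2 : (((i + 1 : Nat) : Int)).toNat = i + 1 := by omega
    rw [ht1, ht2, hpe', Nat.xor_self]
    exact pvGood_zero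
  · obtain ⟨heu, hpe⟩ := pvFind_range_spec hfe
    have hpe' : pvPm l e = pvPm l (i + 1) ^^^ (1 <<< b) := by simpa using hpe
    have hne : e ≠ i + 1 := by
      intro h
      rw [h] at hpe'
      have h0 : (1 <<< b) = 0 := by
        have h2 := congrArg (fun z => pvPm l (i + 1) ^^^ z) hpe'
        simp only [Nat.xor_self]  at h2
        rw [← Nat.xor_assoc, Nat.xor_self, Nat.zero_xor] at h2
        exact h2.symm
      have : (0 : Nat) < 1 <<< b := by
        rw [Nat.shiftLeft_eq, one_mul]
        positivity
      omega
    have heu' : e < i + 1 := by omega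
    refine ⟨y, ?_, le_refl y⟩
    simp only [pvDistsA, List.mem_flatMap, List.mem_map, List.mem_filter,
      PySem.List.mem_pyRange_one]
    refine ⟨(e : Int), ⟨by omega, by omega⟩, ?_⟩
    refine ⟨((i + 1 : Nat) : Int), ⟨⟨by omega, by omega⟩, ?_⟩, by omega⟩
    have ht1 : ((e : Int)).toNat = e := by omega
    have ht2 : (((i + 1 : Nat) : Int)).toNat = i + 1 := by omega
    have hx : pvPm l e ^^^ pvPm l (i + 1) = 1 <<< b := by
      rw [hpe', Nat.xor_comm (pvPm l (i + 1)) (1 <<< b), Nat.xor_assoc,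
        Nat.xor_self, Nat.xor_zero]
    rw [ht1, ht2, hx, Nat.shiftLeft_eq, one_mul]
    exact pvGood_two_pow b hb

-- ===== VERDICT (by name: the statement is the Claim_ definition above) =====
theorem longestAwesomeSubstring_spec : Claim_equal_longestAwesomeSubstring := by
  unfold Claim_equal_longestAwesomeSubstring
  intro s _ hpre
  unfold Spec_longestAwesomeSubstring
  have hchars : ∀ c ∈ s.toList, 71 ≤ c.toNat ∧ c.toNat ≤ 122 := by
    intro c hc
    unfold Pre_longestAwesomeSubstring at hpre
    rw [List.all_eq_true] at hpre
    have := hpre c hc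
    simp at this
    omega
  rw [pvA_eq s hchars, pvAlt_eq, (pvB_inv s.toList).2.2]
  exact pvFoldl_max_congr _ _ 0 (pvDistsA_to_B s.toList) (pvDistsB_to_A s.toList)
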